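-- pv_equiv track=rewrite | github.com/FlechazoLiu/Ai_Python_course | exercise/num_dates.py | num_dates
-- ===== SOURCE A (Python) =====
-- def num_dates(a):
--     # if (not a) or type(a) != list:
--     #     return None
--     if len(a) == 0:
--         return None
--     for item in a:
--         if type(item) != int:
--             return None
--     r = []
--     for i in range(len(a)):
--         f = 0
--         for j in range(len(a)):
--             if i < j and a[j] > a[i]:
--                 r.append(j-i)
--                 f = 1
--                 break
--         if not f:
--             r.append(0)
--     return r
-- ===== SOURCE B (Python) =====
-- def num_dates(a):
--     # Monotonic-stack next-greater-element: O(n) instead of A's O(n^2).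
--     if len(a) == 0:
--         return None
--     for item in a:
--         if type(item) != int:
--             return None
--     n = len(a)
--     res = [0] * n
--     stack = []
--     for j in range(n):
--         while stack and a[stack[-1]] < a[j]:
--             i = stack.pop()
--             res[i] = j - i
--         stack.append(j)
--     return res
-- ===== Notes on version B (the rewrite author's own statement) =====
-- stated objective: faster
-- what changed: Replaced A's nested scan (for each index, rescan the whole list for the first later greater element) with a single-pass monotonic-stack next-greater-element algorithm writing distances into a preallocated result array.
import Mathlib
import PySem

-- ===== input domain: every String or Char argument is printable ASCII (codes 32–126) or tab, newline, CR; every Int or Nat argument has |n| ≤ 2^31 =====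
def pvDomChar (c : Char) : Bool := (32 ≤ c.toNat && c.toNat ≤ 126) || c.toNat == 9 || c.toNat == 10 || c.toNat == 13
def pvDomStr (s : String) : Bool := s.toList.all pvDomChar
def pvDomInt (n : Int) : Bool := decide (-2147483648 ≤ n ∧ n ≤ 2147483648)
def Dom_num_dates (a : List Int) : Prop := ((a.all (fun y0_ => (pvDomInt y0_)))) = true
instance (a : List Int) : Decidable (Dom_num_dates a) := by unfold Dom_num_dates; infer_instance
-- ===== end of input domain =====

-- B replaces A's quadratic nested scan by a one-pass monotonic-stack
-- next-greater-element algorithm (objective: faster, asymptotically).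

-- ===== PORT A =====
-- Python A's inner `for j in range(len(a))` with `break` at the first j with
-- i < j and a[j] > a[i]: ported as find? over the same range.
-- (Indices produced by range are in bounds, so `getD` is exact for `a[j]`.)
def firstGreater (a : List Int) (i : Nat) : Option Nat :=
  (List.range a.length).find? (fun j => decide (i < j) && decide (a.getD j 0 > a.getD i 0))

-- The Python loop `for item in a: if type(item) != int: return None` never
-- returns None for a : List Int, so it is ported as nothing.
def num_dates (a : List Int) : Option (List Int) :=
  if a.length = 0 then none
  else
    some ((List.range a.length).foldl (fun r i =>
      match firstGreater a i with
      | some j => r ++ [(j : Int) - (i : Int)]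
      | none => r ++ [0]) [])

-- ===== PORT B =====
-- the Python `while stack and a[stack[-1]] < a[j]` pop loop; stack head = top
def popLoop (a : List Int) (j : Nat) : List Int → List Nat → List Int × List Nat
  | res, [] => (res, [])
  | res, i :: s =>
    if a.getD i 0 < a.getD j 0 then
      popLoop a j (res.set i ((j : Int) - (i : Int))) s
    else (res, i :: s)

def num_dates_alt (a : List Int) : Option (List Int) :=
  if a.length = 0 then none
  else
    let n := a.length
    let st := (List.range n).foldl (fun st j =>
        let p := popLoop a j st.1 st.2
        (p.1, j :: p.2))
      (List.replicate n 0, ([] : List Nat))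
    some st.1

-- ===== PRECONDITION & SPEC =====
def Spec_num_dates (a : List Int) (out : Option (List Int)) : Prop := out = num_dates_alt a
instance (a : List Int) (out : Option (List Int)) : Decidable (Spec_num_dates a out) := by unfold Spec_num_dates; infer_instance

-- ===== CLAIM (what is proved, stated in full; the proofs are below) =====
def Claim_equal_num_dates : Prop := ∀ (a : List Int), Dom_num_dates a → Spec_num_dates a (num_dates a)

-- ===== LEMMAS AND PROOFS =====

-- value of A's answer at index i
def gval (a : List Int) (i : Nat) : Int :=
  match firstGreater a i with
  | some j => (j : Int) - (i : Int)
  | none => 0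

-- A's fold appends gval one by one
lemma foldl_append_gval (a : List Int) :
    ∀ (l : List Nat) (r : List Int),
      l.foldl (fun r i =>
        match firstGreater a i with
        | some j => r ++ [(j : Int) - (i : Int)]
        | none => r ++ [0]) r = r ++ l.map (gval a) := by
  intro l
  induction l with
  | nil => intro r; simp
  | cons x xs ih =>
      intro r
      simp only [List.foldl_cons, List.map_cons, ih, gval]
      cases firstGreater a x <;> simp

lemma find?_eq_some_of_sorted {p : Nat → Bool} :
    ∀ (l : List Nat), l.Pairwise (· < ·) → ∀ j, j ∈ l → p j = true →
      (∀ k, k ∈ l → p k = true → j ≤ k) → l.find? p = some j := by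
  intro l
  induction l with
  | nil => intro _ j hj; simp at hj
  | cons x xs ih =>
      intro hp j hj hpj hmin
      rcases List.mem_cons.mp hj with rfl | hj'
      · simp [List.find?, hpj]
      · have hxj : x < j := (List.pairwise_cons.mp hp).1 j hj'
        have hpx : p x = false := by
          by_contra h
          have := hmin x (by simp) (by simpa using Bool.of_not_eq_false h)
          omega
        simp only [List.find?, hpx]
        exact ih (List.pairwise_cons.mp hp).2 j hj' hpj
          (fun k hk hpk => hmin k (List.mem_cons_of_mem _ hk) hpk)

lemma firstGreater_eq_some (a : List Int) (i j : Nat) (hj : j < a.length)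
    (hij : i < j) (hgt : a.getD i 0 < a.getD j 0)
    (hmin : ∀ k, i < k → k < j → a.getD k 0 ≤ a.getD i 0) :
    firstGreater a i = some j := by
  apply find?_eq_some_of_sorted _ (List.pairwise_lt_range)
  · simpa using hj
  · simp only [Bool.and_eq_true, decide_eq_true_eq, gt_iff_lt]
    exact ⟨hij, hgt⟩
  · intro k hk hpk
    simp only [Bool.and_eq_true, decide_eq_true_eq] at hpk
    by_contra h
    have h1 : k < j := by omega
    have := hmin k hpk.1 h1
    omega

lemma firstGreater_eq_none (a : List Int) (i : Nat)
    (h : ∀ k, i < k → k < a.length → a.getD k 0 ≤ a.getD i 0) :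
    firstGreater a i = none := by
  apply List.find?_eq_none.mpr
  intro k hk
  simp only [List.mem_range] at hk
  simp only [Bool.and_eq_true, decide_eq_true_eq, not_and]
  intro h1
  have := h k h1 hk
  omega

-- popLoop computes a takeWhile/dropWhile split
lemma popLoop_eq (a : List Int) (j : Nat) :
    ∀ (s : List Nat) (res : List Int),
      popLoop a j res s =
        ((s.takeWhile (fun i => decide (a.getD i 0 < a.getD j 0))).foldl
            (fun r i => r.set i ((j : Int) - (i : Int))) res,
         s.dropWhile (fun i => decide (a.getD i 0 < a.getD j 0))) := by
  intro s
  induction s with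
  | nil => intro res; simp [popLoop]
  | cons x xs ih =>
      intro res
      by_cases h : a.getD x 0 < a.getD j 0
      · simp only [popLoop, List.takeWhile_cons, List.dropWhile_cons, decide_eq_true_eq]
        rw [if_pos h, if_pos h, if_pos h, ih]
        simp
      · simp only [popLoop, List.takeWhile_cons, List.dropWhile_cons, decide_eq_true_eq]
        rw [if_neg h, if_neg h, if_neg h]
        simp

lemma foldl_set_length (f : Nat → Int) :
    ∀ (l : List Nat) (res : List Int),
      (l.foldl (fun r x => r.set x (f x)) res).length = res.length := by
  intro l
  induction l with
  | nil => intro res; rfl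
  | cons x xs ih => intro res; simp [ih]

lemma foldl_set_getD (f : Nat → Int) :
    ∀ (l : List Nat) (res : List Int) (i : Nat), (∀ x ∈ l, x < res.length) →
      (l.foldl (fun r x => r.set x (f x)) res).getD i 0 =
        if i ∈ l then f i else res.getD i 0 := by
  intro l
  induction l with
  | nil => intro res i _; simp
  | cons x xs ih =>
      intro res i hb
      simp only [List.foldl_cons]
      rw [ih (res.set x (f x)) i (by simpa using fun y hy => hb y (List.mem_cons_of_mem _ hy))]
      by_cases hmem : i ∈ xs
      · simp [hmem]
      · have hx : x < res.length := hb x (by simp)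
        by_cases hix : i = x
        · subst hix
          simp [hmem, List.getD, hx]
        · simp [hmem, hix, List.getD, List.getElem?_set_ne (fun h => hix h.symm)]

lemma takeWhile_eq_filter {p : Nat → Bool} :
    ∀ (l : List Nat), l.Pairwise (fun x y => p y = true → p x = true) →
      l.takeWhile p = l.filter p := by
  intro l
  induction l with
  | nil => intro _; rfl
  | cons x xs ih =>
      intro hp
      by_cases h : p x = true
      · simp [h, ih (List.pairwise_cons.mp hp).2]
      · have h0 : p x = false := by simpa using h
        have : xs.filter p = [] := by
          apply List.filter_eq_nil_iff.mpr
          intro y hy hpy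
          have := (List.pairwise_cons.mp hp).1 y hy hpy
          simp [h0] at this
        simp [h0, this]

lemma dropWhile_eq_filter {p : Nat → Bool} :
    ∀ (l : List Nat), l.Pairwise (fun x y => p y = true → p x = true) →
      l.dropWhile p = l.filter (fun x => !p x) := by
  intro l
  induction l with
  | nil => intro _; rfl
  | cons x xs ih =>
      intro hp
      by_cases h : p x = true
      · simp [h, ih (List.pairwise_cons.mp hp).2]
      · have h0 : p x = false := by simpa using h
        have hall : ∀ y ∈ xs, p y = false := by
          intro y hy
          by_contra hc
          have hpy : p y = true := by simpa using hc
          have := (List.pairwise_cons.mp hp).1 y hy hpy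
          simp [h0] at this
        have : xs.filter (fun x => !p x) = xs := by
          apply List.filter_eq_self.mpr
          intro y hy; simp [hall y hy]
        simp [h0, this]

-- the loop invariant for B
def InvB (a : List Int) (j : Nat) (res : List Int) (stack : List Nat) : Prop :=
  res.length = a.length ∧
  stack.Pairwise (fun x y => y < x) ∧
  (∀ i, i ∈ stack ↔ (i < j ∧ ∀ k, i < k → k < j → a.getD k 0 ≤ a.getD i 0)) ∧
  (∀ i, res.getD i 0 =
    if (∃ k ∈ List.range j, i < k ∧ a.getD i 0 < a.getD k 0) then gval a i else 0)

lemma inv_init (a : List Int) : InvB a 0 (List.replicate a.length 0) [] := by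
  refine ⟨by simp, by simp, by simp, ?_⟩
  intro i
  simp [List.getD, List.getElem?_replicate]
  split <;> simp

lemma inv_step (a : List Int) (j : Nat) (res : List Int) (stack : List Nat)
    (hj : j < a.length) (h : InvB a j res stack) :
    InvB a (j + 1) (popLoop a j res stack).1 (j :: (popLoop a j res stack).2) := by
  obtain ⟨hlen, hsort, hmem, hres⟩ := h
  set p : Nat → Bool := fun i => decide (a.getD i 0 < a.getD j 0) with hp
  have hstlt : ∀ i ∈ stack, i < j := fun i hi => ((hmem i).mp hi).1
  have hpair : stack.Pairwise (fun x y => p y = true → p x = true) := by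
    refine hsort.imp_of_mem ?_
    intro x y hx hy hyx hpy
    have hPy := (hmem y).mp hy
    have hxj : x < j := hstlt x hx
    have hxy : a.getD x 0 ≤ a.getD y 0 := hPy.2 x hyx hxj
    simp only [hp, decide_eq_true_eq] at hpy ⊢
    omega
  rw [popLoop_eq, takeWhile_eq_filter stack hpair, dropWhile_eq_filter stack hpair]
  have htw : ∀ i, i ∈ stack.filter p ↔ (i ∈ stack ∧ p i = true) := by
    intro i; simp [List.mem_filter]
  have hdw : ∀ i, i ∈ stack.filter (fun x => !p x) ↔ (i ∈ stack ∧ p i = false) := by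
    intro i; simp [List.mem_filter]
  have hbound : ∀ x ∈ stack.filter p, x < res.length := by
    intro x hx
    have := hstlt x (List.mem_filter.mp hx).1
    omega
  refine ⟨?_, ?_, ?_, ?_⟩
  · simpa [foldl_set_length] using hlen
  · refine List.pairwise_cons.mpr ⟨?_, hsort.filter _⟩
    intro y hy
    exact hstlt y (List.mem_filter.mp hy).1
  · intro i
    constructor
    · intro hi
      rcases List.mem_cons.mp hi with rfl | hi'
      · exact ⟨by omega, fun k hk1 hk2 => by omega⟩
      · obtain ⟨hi2, hpi⟩ := (hdw i).mp hi'
        obtain ⟨hij, hall⟩ := (hmem i).mp hi2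
        refine ⟨by omega, fun k hk1 hk2 => ?_⟩
        by_cases hkj : k = j
        · subst hkj
          simp only [hp, decide_eq_false_iff_not, not_lt] at hpi
          exact hpi
        · exact hall k hk1 (by omega)
    · rintro ⟨hij, hall⟩
      by_cases hij' : i = j
      · exact hij' ▸ List.mem_cons_self
      · refine List.mem_cons_of_mem _ ((hdw i).mpr ⟨(hmem i).mpr ⟨by omega, fun k hk1 hk2 => hall k hk1 (by omega)⟩, ?_⟩)
        have := hall j (by omega) (by omega)
        simp only [hp, decide_eq_false_iff_not, not_lt]
        exact this
  · intro i
    rw [foldl_set_getD _ _ _ _ hbound]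
    by_cases hitw : i ∈ stack.filter p
    · obtain ⟨hist, hpi⟩ := (htw i).mp hitw
      obtain ⟨hij, hall⟩ := (hmem i).mp hist
      simp only [hp, decide_eq_true_eq] at hpi
      have hfg : firstGreater a i = some j := firstGreater_eq_some a i j hj hij hpi hall
      have hcond : (∃ k ∈ List.range (j+1), i < k ∧ a.getD i 0 < a.getD k 0) :=
        ⟨j, by simp, hij, hpi⟩
      rw [if_pos hitw, if_pos hcond]
      simp [gval, hfg]
    · rw [if_neg hitw, hres i]
      by_cases hold : (∃ k ∈ List.range j, i < k ∧ a.getD i 0 < a.getD k 0)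
      · have hnew : (∃ k ∈ List.range (j+1), i < k ∧ a.getD i 0 < a.getD k 0) := by
          obtain ⟨k, hk, hk2⟩ := hold
          exact ⟨k, by simp at hk ⊢; omega, hk2⟩
        rw [if_pos hold, if_pos hnew]
      · have hnew : ¬ (∃ k ∈ List.range (j+1), i < k ∧ a.getD i 0 < a.getD k 0) := by
          rintro ⟨k, hk, hik, hak⟩
          simp only [List.mem_range] at hk
          by_cases hkj : k = j
          · subst hkj
            have hist : i ∈ stack := (hmem i).mpr ⟨hik, fun k' hk1 hk2 => by
              by_contra hc
              exact hold ⟨k', by simp; omega, hk1, by omega⟩⟩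
            exact hitw ((htw i).mpr ⟨hist, by simp [hp]; exact hak⟩)
          · exact hold ⟨k, by simp; omega, hik, hak⟩
        rw [if_neg hold, if_neg hnew]

lemma inv_fold (a : List Int) :
    ∀ (m : Nat), m ≤ a.length →
      InvB a m
        (((List.range m).foldl (fun st j =>
            let p := popLoop a j st.1 st.2
            (p.1, j :: p.2)) (List.replicate a.length 0, ([] : List Nat))).1)
        (((List.range m).foldl (fun st j =>
            let p := popLoop a j st.1 st.2
            (p.1, j :: p.2)) (List.replicate a.length 0, ([] : List Nat))).2) := by
  intro m
  induction m with
  | zero => intro _; simpa using inv_init a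
  | succ m ih =>
      intro hm
      rw [List.range_succ, List.foldl_append]
      exact inv_step a m _ _ (by omega) (ih (by omega))

lemma res_eq_map (a : List Int) :
    (((List.range a.length).foldl (fun st j =>
        let p := popLoop a j st.1 st.2
        (p.1, j :: p.2)) (List.replicate a.length 0, ([] : List Nat))).1)
      = (List.range a.length).map (gval a) := by
  obtain ⟨hlen, -, -, hres⟩ := inv_fold a a.length (le_refl _)
  set res := ((List.range a.length).foldl (fun st j =>
      let p := popLoop a j st.1 st.2
      (p.1, j :: p.2)) (List.replicate a.length 0, ([] : List Nat))).1
  have hval : ∀ i, res.getD i 0 = gval a i ∨ (res.getD i 0 = 0 ∧ gval a i = 0) := by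
    intro i
    rw [hres i]
    by_cases h : (∃ k ∈ List.range a.length, i < k ∧ a.getD i 0 < a.getD k 0)
    · left; rw [if_pos h]
    · right
      have hnone : firstGreater a i = none := by
        apply firstGreater_eq_none
        intro k hk1 hk2
        by_contra hc
        exact h ⟨k, by simpa using hk2, hk1, by omega⟩
      rw [if_neg h]
      simp [gval, hnone]
  apply List.ext_getElem (by simp [hlen])
  intro i h1 h2
  have hg : res.getD i 0 = res[i] := by
    rw [List.getD_eq_getElem?_getD, List.getElem?_eq_getElem h1]; rfl
  have : res[i] = gval a i := by
    rcases hval i with h | ⟨ha, hb⟩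
    · rw [← hg, h]
    · rw [← hg, ha, hb]
  simp [this]

-- ===== VERDICT (by name: the statement is the Claim_ definition above) =====
theorem num_dates_spec : Claim_equal_num_dates := by
  intro a _
  unfold Spec_num_dates num_dates num_dates_alt
  by_cases h : a.length = 0
  · simp [h]
  · simp only [h, if_false]
    rw [foldl_append_gval, res_eq_map]
    simp
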